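-- pv_equiv track=rewrite | github.com/mishrarohit10/Python-100-days | Airport_Management.py | maxPlatform
-- ===== SOURCE A (Python) =====
-- def maxPlatform(arrival, departure, n):
--         m = {}
--         for i in range(n):
--             if arrival[i] not in m:
--                 m[arrival[i]] = 1
--             else:
--                 m[arrival[i]] += 1
--             if departure[i] not in m:
--                 m[departure[i]] = 1
--             else:
--                 m[departure[i]] += 1
--         return max(m.values())
-- ===== SOURCE B (Python) =====
-- def maxPlatform(arrival, departure, n):
--     times = sorted(arrival[:n] + departure[:n])
--     prev = times[0]
--     run = 1
--     best = 1
--     for t in times[1:]: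
--         if t == prev:
--             run += 1
--         else:
--             run = 1
--         if run > best:
--             best = run
--         prev = t
--     return best
-- ===== Notes on version B (the rewrite author's own statement) =====
-- stated objective: alternative
-- what changed: Replaces the incremental hash-map counter with sort-then-scan: sort the first n arrivals and departures together and take the longest run of equal consecutive values, finding the maximum multiplicity via ordering instead of a frequency dict.
import Mathlib
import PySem

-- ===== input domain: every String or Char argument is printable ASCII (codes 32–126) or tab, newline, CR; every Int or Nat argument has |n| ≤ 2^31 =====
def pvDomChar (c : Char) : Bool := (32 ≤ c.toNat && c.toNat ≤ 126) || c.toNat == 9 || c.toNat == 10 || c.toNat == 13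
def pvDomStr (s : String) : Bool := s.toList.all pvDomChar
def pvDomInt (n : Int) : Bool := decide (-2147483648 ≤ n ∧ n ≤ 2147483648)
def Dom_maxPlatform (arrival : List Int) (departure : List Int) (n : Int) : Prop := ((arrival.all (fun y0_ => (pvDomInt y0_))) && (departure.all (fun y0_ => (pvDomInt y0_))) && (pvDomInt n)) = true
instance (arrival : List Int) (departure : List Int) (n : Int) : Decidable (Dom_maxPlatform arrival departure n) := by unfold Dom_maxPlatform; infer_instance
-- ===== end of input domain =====

-- B replaces A's incremental dict counter by sort-then-scan: sort the first n arrivals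
-- and departures together and return the longest run of equal consecutive values
-- (a different algorithm of similar cost; no speed claim).

-- ===== PORT A =====
def maxPlatform (arrival : List Int) (departure : List Int) (n : Int) : Int :=
  let m := (PySem.List.pyRange 0 n).foldl
    (fun m i =>
      let a := PySem.List.pyGetD arrival i 0
      let m := if m.contains a = false then m.insert a 1 else m.insert a (m.getD a 0 + 1)
      let d := PySem.List.pyGetD departure i 0
      if m.contains d = false then m.insert d 1 else m.insert d (m.getD d 0 + 1))
    PySem.Dict.empty
  match PySem.List.max? m.values (fun v => v) with
  | some v => v
  | none => 0  -- unreachable under Pre_ (Python's max raises ValueError on an empty dict)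

-- ===== PORT B =====
def maxPlatform_alt (arrival : List Int) (departure : List Int) (n : Int) : Int :=
  let times := PySem.List.sorted
    (PySem.List.slice arrival none (some n) ++ PySem.List.slice departure none (some n))
    (fun t => t) false
  let prev := PySem.List.pyGetD times 0 0  -- times[0]; Python raises IndexError on an empty list (outside Pre_)
  let st := (PySem.List.slice times (some 1) none).foldl
    (fun (s : Int × Int × Int) t =>
      let run := if t = s.1 then s.2.1 + 1 else 1
      let best := if run > s.2.2 then run else s.2.2
      (t, run, best)) (prev, 1, 1)
  st.2.2

-- ===== PRECONDITION & SPEC =====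
-- Pre_ excludes exactly the inputs on which Python A raises: n ≤ 0 (empty dict, max raises
-- ValueError) and n larger than a list's length (IndexError on arrival[i]/departure[i]).
def Pre_maxPlatform (arrival : List Int) (departure : List Int) (n : Int) : Prop :=
  1 ≤ n ∧ n ≤ arrival.length ∧ n ≤ departure.length
instance (arrival : List Int) (departure : List Int) (n : Int) : Decidable (Pre_maxPlatform arrival departure n) := by unfold Pre_maxPlatform; infer_instance

def pvWitness_maxPlatform : List Int × List Int × Int := ([1, 2], [2, 5], 2)

def Spec_maxPlatform (arrival : List Int) (departure : List Int) (n : Int) (out : Int) : Prop := out = maxPlatform_alt arrival departure n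
instance (arrival : List Int) (departure : List Int) (n : Int) (out : Int) : Decidable (Spec_maxPlatform arrival departure n out) := by unfold Spec_maxPlatform; infer_instance

-- ===== CLAIM (what is proved, stated in full; the proofs are below) =====
def Claim_equal_maxPlatform : Prop := ∀ (arrival : List Int) (departure : List Int) (n : Int), Dom_maxPlatform arrival departure n → Pre_maxPlatform arrival departure n → Spec_maxPlatform arrival departure n (maxPlatform arrival departure n)

-- ===== LEMMAS AND PROOFS =====

-- maximum multiplicity of a list (0 for the empty list)
def pvS : List Int → Int
  | [] => 0
  | t :: ts => max (1 + (ts.count t : Int)) (pvS (ts.filter (fun x => x ≠ t)))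
termination_by l => l.length
decreasing_by
  have h := List.length_filter_le (fun (x : Subtype (Membership.mem ts)) => !decide ((x : Int) = t)) ts.attach
  simp only [List.length_attach] at h
  simpa using Nat.lt_succ_of_le h

theorem pvS_nil : pvS [] = 0 := by simp [pvS]

theorem pvS_cons (t : Int) (ts : List Int) :
    pvS (t :: ts) = max (1 + (ts.count t : Int)) (pvS (ts.filter (fun x => x ≠ t))) := by
  simp [pvS]

-- maximum over the run values B's loop pushes into `best` (0 if the loop body never runs)
def pvSuprun : Int → Int → List Int → Int
  | _, _, [] => 0
  | prev, run, t :: ts =>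
      let run' := if t = prev then run + 1 else 1
      max run' (pvSuprun t run' ts)

-- A's insert-or-increment branch is exactly `insert x (getD x 0 + 1)` in both cases.
theorem pv_step_eq {d : PySem.Dict Int Int} {x : Int} :
    (if d.contains x = false then d.insert x 1 else d.insert x (d.getD x 0 + 1))
      = d.insert x (d.getD x 0 + 1) := by
  by_cases h : d.contains x = false
  · simp [h, PySem.Dict.getD_of_not_contains d 0 h]
  · simp [h]

-- The paired loop is the counter fold over the interleaved sequence.
theorem pv_fold_pairs (A D : Int → Int) (l : List Int) (d : PySem.Dict Int Int) :
    l.foldl (fun d i => (d.insert (A i) (d.getD (A i) 0 + 1)).insert (D i)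
        ((d.insert (A i) (d.getD (A i) 0 + 1)).getD (D i) 0 + 1)) d
      = (l.flatMap (fun i => [A i, D i])).foldl (fun d x => d.insert x (d.getD x 0 + 1)) d := by
  induction l generalizing d with
  | nil => rfl
  | cons hd tl ih => simp [List.flatMap_cons, ih]

-- interleaving is a permutation of the concatenation of the two projections
theorem pv_flatMap_perm {α : Type} (A D : α → Int) (l : List α) :
    (l.flatMap (fun i => [A i, D i])).Perm (l.map A ++ l.map D) := by
  induction l with
  | nil => simp
  | cons hd tl ih =>
      simp only [List.flatMap_cons, List.map_cons, List.cons_append, List.nil_append]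
      refine List.Perm.cons _ (List.Perm.trans (List.Perm.cons _ ih) ?_)
      exact List.perm_middle.symm

-- reading indices 0..k-1 of xs reproduces take k
theorem pv_map_getD_range (xs : List Int) (k : Nat) (hk : k ≤ xs.length) :
    (List.range k).map (fun (i : Nat) => PySem.List.pyGetD xs (i : Int) 0) = xs.take k := by
  apply List.ext_getElem
  · simp [hk]
  · intro j h1 h2
    simp at h1
    rw [List.getElem_map, List.getElem_range,
      PySem.List.pyGetD_eq_getElem xs 0 (by omega) (by omega)]
    simp [List.getElem_take]

-- max over lists with the same elements (as sets) agree
theorem pv_max_congr (l₁ l₂ : List Int) (h : ∀ x : Int, x ∈ l₁ ↔ x ∈ l₂) :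
    PySem.List.max? l₁ (fun y => y) = PySem.List.max? l₂ (fun y => y) := by
  cases h1 : PySem.List.max? l₁ (fun y => y) with
  | none =>
      rw [PySem.List.max?_eq_none_iff] at h1
      subst h1
      rw [eq_comm, PySem.List.max?_eq_none_iff]
      cases l₂ with
      | nil => rfl
      | cons a t => exact absurd ((h a).mpr (by simp)) (by simp)
  | some m₁ =>
      cases h2 : PySem.List.max? l₂ (fun y => y) with
      | none =>
          rw [PySem.List.max?_eq_none_iff] at h2
          subst h2
          exact absurd ((h m₁).mp (PySem.List.max?_mem h1)) (by simp)
      | some m₂ =>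
          have hle1 : m₁ ≤ m₂ := PySem.List.max?_isMax h2 m₁ ((h m₁).mp (PySem.List.max?_mem h1))
          have hle2 : m₂ ≤ m₁ := PySem.List.max?_isMax h1 m₂ ((h m₂).mpr (PySem.List.max?_mem h2))
          exact congrArg some (le_antisymm hle1 hle2)

-- B's loop computes `max best (pvSuprun prev run l)`
theorem pv_fold_scan (l : List Int) (prev run best : Int) (hb : 0 ≤ best) :
    (l.foldl (fun (s : Int × Int × Int) t =>
      let run := if t = s.1 then s.2.1 + 1 else 1
      let best := if run > s.2.2 then run else s.2.2
      (t, run, best)) (prev, run, best)).2.2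
    = max best (pvSuprun prev run l) := by
  induction l generalizing prev run best with
  | nil => simp [pvSuprun, max_eq_left hb]
  | cons t ts ih =>
      simp only [List.foldl_cons, pvSuprun]
      rw [ih t (if t = prev then run + 1 else 1)
        (if (if t = prev then run + 1 else 1) > best then (if t = prev then run + 1 else 1) else best)
        (by split_ifs <;> omega)]
      have : (if (if t = prev then run + 1 else 1) > best then (if t = prev then run + 1 else 1) else best)
          = max best (if t = prev then run + 1 else 1) := by
        simp only [max_def]; split_ifs <;> omega
      rw [this, max_assoc]

-- pvS is nonnegative
theorem pvS_nonneg : ∀ (N : Nat) (ts : List Int), ts.length ≤ N → 0 ≤ pvS ts := by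
  intro N
  induction N with
  | zero =>
      intro ts h
      have hnil : ts = [] := List.length_eq_zero_iff.mp (by omega)
      subst hnil
      simp [pvS_nil]
  | succ N ih =>
      intro ts h
      cases ts with
      | nil => simp [pvS_nil]
      | cons t ts =>
          rw [pvS_cons]
          have := ih (ts.filter (fun x => x ≠ t)) (by
            have hlf := List.length_filter_le (fun x => decide (x ≠ t)) ts
            simp at h hlf ⊢; omega)
          have hc : (0 : Int) ≤ 1 + ts.count t := by positivity
          exact le_trans hc (le_max_left _ _)

-- every multiplicity is at most pvS
theorem pvS_ge : ∀ (N : Nat) (ts : List Int), ts.length ≤ N → ∀ t ∈ ts, (ts.count t : Int) ≤ pvS ts := by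
  intro N
  induction N with
  | zero =>
      intro ts h t ht
      have hnil : ts = [] := List.length_eq_zero_iff.mp (by omega)
      subst hnil
      simp at ht
  | succ N ih =>
      intro ts h t ht
      cases ts with
      | nil => simp at ht
      | cons x rest =>
          rw [pvS_cons]
          by_cases hx : t = x
          · subst hx
            have : (t :: rest).count t = 1 + rest.count t := by
              rw [List.count_cons_self]; omega
            rw [this]
            push_cast
            exact le_max_left _ _
          · have hmem : t ∈ rest := by
              rcases List.mem_cons.mp ht with h1 | h1
              · exact absurd h1 hx
              · exact h1
            have hcount : (x :: rest).count t = rest.count t := by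
              simp [Ne.symm hx]
            have hcf : (rest.filter (fun y => y ≠ x)).count t = rest.count t :=
              List.count_filter (by simp [hx])
            have hmf : t ∈ rest.filter (fun y => y ≠ x) :=
              List.mem_filter.mpr ⟨hmem, by simp [hx]⟩
            have hlen : (rest.filter (fun y => y ≠ x)).length ≤ N := by
              have hlf := List.length_filter_le (fun y => decide (y ≠ x)) rest
              simp at h hlf ⊢; omega
            have := ih _ hlen t hmf
            rw [hcf] at this
            rw [hcount]
            exact le_trans this (le_max_right _ _)

-- pvS is attained by some element
theorem pvS_attained : ∀ (N : Nat) (ts : List Int), ts.length ≤ N → ts ≠ [] →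
    ∃ t ∈ ts, pvS ts = (ts.count t : Int) := by
  intro N
  induction N with
  | zero => intro ts h hne; exact absurd (List.length_eq_zero_iff.mp (by omega)) hne
  | succ N ih =>
      intro ts h hne
      cases ts with
      | nil => exact absurd rfl hne
      | cons x rest =>
          rw [pvS_cons]
          set F := rest.filter (fun y => y ≠ x) with hF
          by_cases hle : pvS F ≤ 1 + rest.count x
          · refine ⟨x, by simp, ?_⟩
            rw [max_eq_left (by exact_mod_cast hle)]
            rw [List.count_cons_self]
            push_cast
            omega
          · rw [not_le] at hle
            have hFne : F ≠ [] := by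
              intro h0
              rw [h0, pvS_nil] at hle
              have : (0:Int) ≤ rest.count x := by positivity
              omega
            have hlen : F.length ≤ N := by
              have hlf := List.length_filter_le (fun y => decide (y ≠ x)) rest
              simp at h hlf
              simp [hF]; omega
            obtain ⟨t, htF, heq⟩ := ih F hlen hFne
            obtain ⟨htr, htx⟩ := List.mem_filter.mp htF
            have htx' : t ≠ x := by simpa using htx
            refine ⟨t, by simp [List.mem_cons, htr], ?_⟩
            rw [max_eq_right (le_of_lt (by exact_mod_cast hle))]
            rw [heq, hF, List.count_filter (by simp [htx'])]
            simp [Ne.symm htx']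

-- Python's max over the multiplicities is pvS
theorem pv_max_counts (ts : List Int) (hne : ts ≠ []) :
    PySem.List.max? (ts.map (fun t => (ts.count t : Int))) (fun y => y) = some (pvS ts) := by
  cases h1 : PySem.List.max? (ts.map (fun t => (ts.count t : Int))) (fun y => y) with
  | none =>
      rw [PySem.List.max?_eq_none_iff, List.map_eq_nil_iff] at h1
      exact absurd h1 hne
  | some m =>
      obtain ⟨t, ht, hm⟩ := List.mem_map.mp (PySem.List.max?_mem h1)
      obtain ⟨t₀, ht₀, heq⟩ := pvS_attained ts.length ts le_rfl hne
      have h2 : m ≤ pvS ts := hm ▸ pvS_ge ts.length ts le_rfl t ht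
      have h3 : pvS ts ≤ m := by
        rw [heq]
        exact PySem.List.max?_isMax h1 _ (List.mem_map.mpr ⟨t₀, ht₀, rfl⟩)
      exact congrArg some (le_antisymm h2 h3)

-- on a sorted list, pvSuprun computes the maximum multiplicity (up to the first block)
theorem pv_suprun_sorted : ∀ (l : List Int) (prev run : Int), 1 ≤ run →
    (prev :: l).Pairwise (· ≤ ·) →
    pvSuprun prev run l
      = max (if 0 < l.count prev then run + l.count prev else 0)
          (pvS (l.filter (fun x => x ≠ prev))) := by
  intro l
  induction l with
  | nil => intro prev run h1 _; simp [pvSuprun, pvS_nil]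
  | cons t ts ih =>
      intro prev run h1 hsorted
      by_cases ht : t = prev
      · subst ht
        rw [pvSuprun]
        simp only [if_true]
        rw [ih t (run + 1) (by omega) (hsorted.sublist (List.sublist_cons_self _ _))]
        have hcount : (t :: ts).count t = 1 + ts.count t := by
          rw [List.count_cons_self]; omega
        have hfilter : ((t :: ts).filter (fun x => x ≠ t)) = ts.filter (fun x => x ≠ t) := by
          simp
        rw [hcount, hfilter]
        have hS : 0 ≤ pvS (ts.filter (fun x => x ≠ t)) :=
          pvS_nonneg _ _ le_rfl
        push_cast
        simp only [max_def]
        split_ifs <;> omega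
      · -- t ≠ prev: prev occurs nowhere in t :: ts (sorted, prev < t ≤ everything)
        rw [pvSuprun]
        simp only [if_neg ht]
        have hsorted' : (t :: ts).Pairwise (· ≤ ·) := (List.pairwise_cons.mp hsorted).2
        have hplt : prev < t := lt_of_le_of_ne ((List.pairwise_cons.mp hsorted).1 t (by simp)) (fun h => ht h.symm)
        have hnoprev : ∀ x ∈ t :: ts, x ≠ prev := by
          intro x hx
          rcases List.mem_cons.mp hx with h1 | h1
          · subst h1; omega
          · have := (List.pairwise_cons.mp hsorted').1 x h1
            omega
        rw [ih t 1 le_rfl hsorted']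
        have hcprev : (t :: ts).count prev = 0 :=
          List.count_eq_zero.mpr (fun h => hnoprev prev h rfl)
        have hfid : ((t :: ts).filter (fun x => x ≠ prev)) = t :: ts :=
          List.filter_eq_self.mpr (fun a ha => by simp [hnoprev a ha])
        rw [hcprev, hfid, pvS_cons]
        have hSnn : 0 ≤ pvS (ts.filter (fun x => x ≠ t)) := pvS_nonneg _ _ le_rfl
        push_cast
        simp only [max_def]
        split_ifs <;> omega

-- B's scan over a sorted nonempty list yields the maximum multiplicity
theorem pv_scan_sorted (x : Int) (l : List Int) (hsorted : (x :: l).Pairwise (· ≤ ·)) :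
    (l.foldl (fun (s : Int × Int × Int) t =>
      let run := if t = s.1 then s.2.1 + 1 else 1
      let best := if run > s.2.2 then run else s.2.2
      (t, run, best)) (x, 1, 1)).2.2 = pvS (x :: l) := by
  rw [pv_fold_scan l x 1 1 (by omega), pv_suprun_sorted l x 1 le_rfl hsorted, pvS_cons]
  have hSnn : 0 ≤ pvS (l.filter (fun y => y ≠ x)) := pvS_nonneg _ _ le_rfl
  simp only [max_def]
  split_ifs <;> omega

-- ===== VERDICT (by name: the statement is the Claim_ definition above) =====
theorem maxPlatform_spec : Claim_equal_maxPlatform := by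
  intro arrival departure n _ hpre
  obtain ⟨hn1, hna, hnd⟩ := hpre
  unfold Spec_maxPlatform maxPlatform maxPlatform_alt
  set k := n.toNat with hk
  have hnk : n = (k : Int) := (Int.toNat_of_nonneg (by omega)).symm
  have hka : k ≤ arrival.length := by omega
  have hkd : k ≤ departure.length := by omega
  have hk1 : 1 ≤ k := by omega
  -- A's dict is the counter of the interleaved sequence
  simp only [pv_step_eq]
  rw [hnk, PySem.List.pyRange_zero_natCast, pv_fold_pairs, List.flatMap_map,
    PySem.Dict.foldl_insert_getD_add_one_eq_counter]
  -- B's list before sorting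
  have hslice : PySem.List.slice arrival none (some n) ++ PySem.List.slice departure none (some n)
      = arrival.take k ++ departure.take k := by
    rw [PySem.List.slice_to arrival (by omega), PySem.List.slice_to departure (by omega), hnk]
    simp
  rw [hnk] at hslice
  rw [hslice]
  -- the sorted list
  set ts := PySem.List.sorted (arrival.take k ++ departure.take k) (fun t => t) false with hts
  have htsperm : ts.Perm (arrival.take k ++ departure.take k) :=
    PySem.List.sorted_perm _ _ _
  have htsne : ts ≠ [] := by
    intro h0
    have := htsperm.length_eq
    rw [h0] at this
    simp [List.length_take, min_eq_left hka, min_eq_left hkd] at this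
    omega
  obtain ⟨x, l, hxl⟩ := List.exists_cons_of_ne_nil htsne
  have htssorted : ts.Pairwise (· ≤ ·) := by
    have := PySem.List.sorted_pairwise (arrival.take k ++ departure.take k) (fun t => t)
    simpa [hts] using this
  -- the interleaved sequence is a permutation of ts
  have hperm : ((List.range k).flatMap
        (fun (a : Nat) => [PySem.List.pyGetD arrival (a : Int) 0, PySem.List.pyGetD departure (a : Int) 0])).Perm ts := by
    have h1 := pv_flatMap_perm (fun (i : Nat) => PySem.List.pyGetD arrival (i : Int) 0)
      (fun (i : Nat) => PySem.List.pyGetD departure (i : Int) 0) (List.range k)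
    rw [pv_map_getD_range arrival k hka, pv_map_getD_range departure k hkd] at h1
    exact h1.trans htsperm.symm
  -- values of the counter are the counts over the distinct elements
  have hvals : (PySem.Dict.counter ((List.range k).flatMap
        (fun (a : Nat) => [PySem.List.pyGetD arrival (a : Int) 0, PySem.List.pyGetD departure (a : Int) 0]))).values
      = (PySem.Set.ofList ((List.range k).flatMap
        (fun (a : Nat) => [PySem.List.pyGetD arrival (a : Int) 0, PySem.List.pyGetD departure (a : Int) 0]))).map
        (fun z => (((List.range k).flatMap
        (fun (a : Nat) => [PySem.List.pyGetD arrival (a : Int) 0, PySem.List.pyGetD departure (a : Int) 0])).count z : Int)) := by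
    show ((PySem.Dict.counter _).items).map (·.2) = _
    rw [PySem.Dict.items_counter]
    simp
  rw [hvals]
  -- A's max ranges over the same values as the multiplicities of ts
  have hmx := pv_max_congr
    ((PySem.Set.ofList ((List.range k).flatMap
        (fun (a : Nat) => [PySem.List.pyGetD arrival (a : Int) 0, PySem.List.pyGetD departure (a : Int) 0]))).map
        (fun z => (((List.range k).flatMap
        (fun (a : Nat) => [PySem.List.pyGetD arrival (a : Int) 0, PySem.List.pyGetD departure (a : Int) 0])).count z : Int)))
    (ts.map (fun t => (ts.count t : Int)))
    (by
      intro z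
      simp only [List.mem_map, PySem.Set.mem_ofList]
      constructor
      · rintro ⟨t, ht, rfl⟩
        exact ⟨t, hperm.mem_iff.mp ht, by rw [hperm.count_eq]⟩
      · rintro ⟨t, ht, rfl⟩
        exact ⟨t, hperm.mem_iff.mpr ht, by rw [hperm.count_eq]⟩)
  rw [hmx, pv_max_counts ts htsne]
  -- B's side: head and tail of ts
  have hhead : PySem.List.pyGetD ts 0 0 = x := by
    rw [hxl]
    rw [PySem.List.pyGetD_ofNat' (x :: l) 0 0]
    rfl
  have htail : PySem.List.slice ts (some 1) none = l := by
    rw [PySem.List.slice_from_one, hxl]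
    rfl
  rw [hhead, htail, pv_scan_sorted x l (hxl ▸ htssorted), hxl]
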